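-- pv_equiv track=rewrite | github.com/agbusiness195/Stele | implementations/python/stele/ccl.py | specificity
-- ===== SOURCE A (Python) =====
-- def specificity(action_pattern: str, resource_pattern: str) -> int:
--     """Calculate the specificity score of an action+resource pattern pair.
--
--     More specific patterns produce higher scores:
--     - Literal segment: 2 points
--     - Single wildcard (*): 1 point
--     - Double wildcard (**): 0 points
--     """
--     score = 0
--
--     action_parts = action_pattern.split(".")
--     for part in action_parts:
--         if part == "**":
--             score += 0
--         elif part == "*":
--             score += 1
--         else:
--             score += 2
--
--     norm_resource = resource_pattern.strip("/")
--     if norm_resource: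
--         resource_parts = norm_resource.split("/")
--         for part in resource_parts:
--             if part == "**":
--                 score += 0
--             elif part == "*":
--                 score += 1
--             else:
--                 score += 2
--
--     return score
-- ===== SOURCE B (Python) =====
-- def specificity(action_pattern: str, resource_pattern: str) -> int:
--     def scan(s, sep):
--         # One pass over the characters; no splitting into segment lists.
--         total = 0
--         stars = 0
--         other = False
--         for ch in s + sep:
--             if ch == sep:
--                 total += 2 if (other or stars not in (1, 2)) else 2 - stars
--                 stars = 0
--                 other = False
--             elif ch == "*":
--                 stars += 1
--             else:
--                 other = True
--         return total
--
--     score = scan(action_pattern, ".")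
--     norm_resource = resource_pattern.strip("/")
--     if norm_resource:
--         score += scan(norm_resource, "/")
--     return score
-- ===== Notes on version B (the rewrite author's own statement) =====
-- stated objective: alternative
-- what changed: Replaces splitting into segment lists and per-segment classification with a single character-level state machine over the raw string (tracking star count and a non-star flag per segment, emitting a weight at each separator), so no split lists are ever built.
import Mathlib
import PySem

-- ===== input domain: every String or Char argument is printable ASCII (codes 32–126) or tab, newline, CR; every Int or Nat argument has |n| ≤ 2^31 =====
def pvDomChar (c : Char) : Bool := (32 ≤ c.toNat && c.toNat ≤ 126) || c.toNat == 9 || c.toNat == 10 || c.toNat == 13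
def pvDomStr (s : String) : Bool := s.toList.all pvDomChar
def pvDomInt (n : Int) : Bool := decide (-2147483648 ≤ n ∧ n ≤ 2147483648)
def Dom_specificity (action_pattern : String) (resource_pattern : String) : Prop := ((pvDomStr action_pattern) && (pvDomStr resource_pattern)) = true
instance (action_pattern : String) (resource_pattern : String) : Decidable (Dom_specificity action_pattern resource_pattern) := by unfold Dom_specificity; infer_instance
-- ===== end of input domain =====

-- B scores patterns with a single character-level state machine (star count + non-star
-- flag per segment) instead of A's split-into-lists plus per-segment classification.

-- ===== PORT A =====
def specificity (action_pattern : String) (resource_pattern : String) : Int :=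
  let score : Int := 0
  let action_parts := (PySem.Str.split? action_pattern ".").getD []
  let score := action_parts.foldl (fun acc part =>
    if part == "**" then acc + 0
    else if part == "*" then acc + 1
    else acc + 2) score
  let norm_resource := PySem.Str.stripChars resource_pattern "/"
  if norm_resource ≠ "" then
    let resource_parts := (PySem.Str.split? norm_resource "/").getD []
    resource_parts.foldl (fun acc part =>
      if part == "**" then acc + 0
      else if part == "*" then acc + 1
      else acc + 2) score
  else
    score

-- ===== PORT B =====
-- one pass over the characters of s + sep; no segment lists are built
def pvScanStep (sep : Char) (st : Int × Int × Bool) (ch : Char) : Int × Int × Bool :=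
  let (total, stars, other) := st
  if ch == sep then
    (total + (if other || !(stars == 1 || stars == 2) then 2 else 2 - stars), 0, false)
  else if ch == '*' then (total, stars + 1, other)
  else (total, stars, true)

def pvScan (s : String) (sep : Char) : Int :=
  ((s.toList ++ [sep]).foldl (pvScanStep sep) ((0 : Int), (0 : Int), false)).1

def specificity_alt (action_pattern : String) (resource_pattern : String) : Int :=
  let score := pvScan action_pattern '.'
  let norm_resource := PySem.Str.stripChars resource_pattern "/"
  if norm_resource ≠ "" then
    score + pvScan norm_resource '/'
  else
    score

-- ===== PRECONDITION & SPEC =====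
def Spec_specificity (action_pattern : String) (resource_pattern : String) (out : Int) : Prop := out = specificity_alt action_pattern resource_pattern
instance (action_pattern : String) (resource_pattern : String) (out : Int) : Decidable (Spec_specificity action_pattern resource_pattern out) := by unfold Spec_specificity; infer_instance

-- ===== CLAIM (what is proved, stated in full; the proofs are below) =====
def Claim_equal_specificity : Prop := ∀ (action_pattern : String) (resource_pattern : String), Dom_specificity action_pattern resource_pattern → Spec_specificity action_pattern resource_pattern (specificity action_pattern resource_pattern)

-- ===== LEMMAS AND PROOFS =====

-- weight of one segment of characters
def pvWSeg (seg : List Char) : Int :=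
  if seg = ['*', '*'] then 0 else if seg = ['*'] then 1 else 2

def pvSumW (segs : List (List Char)) : Int := (segs.map pvWSeg).sum

lemma pvWSeg_reverse (seg : List Char) : pvWSeg seg.reverse = pvWSeg seg := by
  have h2 : seg.reverse = ['*', '*'] ↔ seg = ['*', '*'] := by
    rw [List.reverse_eq_iff]; rfl
  have h1 : seg.reverse = ['*'] ↔ seg = ['*'] := by
    rw [List.reverse_eq_iff]; rfl
  simp [pvWSeg, h2, h1]

-- A's per-segment fold equals the sum of segment weights
lemma pvFoldA_eq (segs : List (List Char)) (acc : Int) :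
    (segs.map String.ofList).foldl (fun acc part =>
      if part == "**" then acc + 0
      else if part == "*" then acc + 1
      else acc + 2) acc = acc + pvSumW segs := by
  induction segs generalizing acc with
  | nil => simp [pvSumW]
  | cons h t ih =>
    have h2 : (String.ofList h == "**") = decide (h = ['*', '*']) := by
      by_cases e : h = ['*', '*']
      · subst e; rfl
      · have hne : ¬ String.ofList h = "**" := fun x => e (by
          have := congrArg String.toList x; simpa using this)
        simp [e, hne]
    have h1 : (String.ofList h == "*") = decide (h = ['*']) := by
      by_cases e : h = ['*']
      · subst e; rfl
      · have hne : ¬ String.ofList h = "*" := fun x => e (by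
          have := congrArg String.toList x; simpa using this)
        simp [e, hne]
    simp only [List.map_cons, List.foldl_cons, ih, pvSumW, List.sum_cons, h2, h1, pvWSeg,
      List.map_cons]
    by_cases e2 : h = ['*', '*']
    · simp [e2]; try ring
    · by_cases e1 : h = ['*']
      · simp [e1, e2]; try ring
      · simp [e1, e2]; try ring

-- the emitted weight for a finished segment matches pvWSeg
lemma pvEmit_eq (seg : List Char) :
    (if seg.any (· != '*') || !((seg.count '*' : Int) == 1 || (seg.count '*' : Int) == 2)
     then (2 : Int) else 2 - (seg.count '*' : Int)) = pvWSeg seg := by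
  by_cases ho : seg.any (· != '*')
  · have hne2 : seg ≠ ['*', '*'] := by intro e; subst e; simp at ho
    have hne1 : seg ≠ ['*'] := by intro e; subst e; simp at ho
    simp [ho, pvWSeg, hne1, hne2]
  · have hall : ∀ x ∈ seg, x = '*' := by
      intro x hx
      by_contra hne
      exact ho (List.any_eq_true.mpr ⟨x, hx, by simpa using hne⟩)
    obtain ⟨n, rfl⟩ : ∃ n, seg = List.replicate n '*' :=
      ⟨seg.length, List.eq_replicate_length.mpr hall⟩
    rcases n with _ | _ | _ | n
    · simp [pvWSeg]
    · simp [pvWSeg, List.replicate]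
    · simp [pvWSeg, List.replicate]
    · have hc : (List.count '*' (List.replicate (n + 3) '*') : Int) = (n : Int) + 3 := by
        simp
      have hcond : (((List.replicate (n + 3) '*').any (· != '*'))
          || !(((n : Int) + 3) == 1 || ((n : Int) + 3) == 2)) = true := by
        simp
        omega
      rw [hc, hcond]
      have hne2 : List.replicate (n + 3) '*' ≠ ['*', '*'] := by
        intro e
        have := congrArg List.length e
        simp at this
      have hne1 : List.replicate (n + 3) '*' ≠ ['*'] := by
        intro e
        have := congrArg List.length e
        simp at this
      simp [pvWSeg, hne1, hne2]

-- unfolding equations for PySem.Chars.splitOn.go at a single-character separator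
lemma pvGo_nil (c : Char) (f : Nat) (rcur : List Char) (acc : List (List Char)) :
    PySem.Chars.splitOn.go [c] (f + 1) [] rcur acc = (rcur.reverse :: acc).reverse := by
  rw [PySem.Chars.splitOn.go]
  omega

lemma pvGo_sep (c x : Char) (rest : List Char) (f : Nat) (rcur : List Char)
    (acc : List (List Char)) (hx : x = c) :
    PySem.Chars.splitOn.go [c] (f + 1) (x :: rest) rcur acc
      = PySem.Chars.splitOn.go [c] f rest [] (rcur.reverse :: acc) := by
  rw [PySem.Chars.splitOn.go]
  simp [List.isPrefixOf, hx]

lemma pvGo_other (c x : Char) (rest : List Char) (f : Nat) (rcur : List Char)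
    (acc : List (List Char)) (hx : x ≠ c) :
    PySem.Chars.splitOn.go [c] (f + 1) (x :: rest) rcur acc
      = PySem.Chars.splitOn.go [c] f rest (x :: rcur) acc := by
  rw [PySem.Chars.splitOn.go]
  have : ([c].isPrefixOf (x :: rest)) = false := by
    simp [List.isPrefixOf]; intro e; exact absurd e.symm hx
  simp [this]

-- core invariant: the char scan from a mid-segment state computes the summed weights
-- that splitOn.go will produce (rcur holds the current segment's chars, reversed)
lemma pvScan_go (c : Char) :
    ∀ (l : List Char) (fuel : Nat) (rcur : List Char) (acc : List (List Char)) (t : Int),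
      l.length < fuel →
      ((l ++ [c]).foldl (pvScanStep c)
          (t, (rcur.count '*' : Int), rcur.any (· != '*'))).1
        = t + pvSumW (PySem.Chars.splitOn.go [c] fuel l rcur acc) - pvSumW acc.reverse := by
  intro l
  induction l with
  | nil =>
    intro fuel rcur acc t hf
    rcases fuel with _ | f
    · omega
    · rw [pvGo_nil]
      simp only [List.nil_append, List.foldl_cons, List.foldl_nil, pvScanStep,
        beq_self_eq_true, if_true]
      rw [pvEmit_eq rcur]
      simp only [List.reverse_cons, pvSumW, List.map_append, List.sum_append, List.map_cons,
        List.sum_cons, List.map_nil, List.sum_nil, pvWSeg_reverse]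
      ring
  | cons x rest ih =>
    intro fuel rcur acc t hf
    rcases fuel with _ | f
    · omega
    · by_cases hx : x = c
      · rw [pvGo_sep c x rest f rcur acc hx]
        simp only [List.cons_append, List.foldl_cons, pvScanStep, hx, beq_self_eq_true, if_true]
        have := ih f [] (rcur.reverse :: acc)
          (t + (if rcur.any (· != '*') || !((rcur.count '*' : Int) == 1 || (rcur.count '*' : Int) == 2) then 2 else 2 - (rcur.count '*' : Int)))
          (by simpa using Nat.lt_of_succ_lt_succ hf)
        simp only [List.count_nil, Nat.cast_zero, List.any_nil] at this
        rw [this, pvEmit_eq rcur]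
        simp only [List.reverse_cons, pvSumW, List.map_append, List.sum_append,
          List.map_cons, List.sum_cons, List.map_nil, List.sum_nil, pvWSeg_reverse]
        ring
      · rw [pvGo_other c x rest f rcur acc hx]
        simp only [List.cons_append, List.foldl_cons, pvScanStep]
        have hxc : (x == c) = false := by simpa using hx
        rw [hxc]
        simp only [Bool.false_eq_true, if_false]
        by_cases hs : x = '*'
        · subst hs
          simp only [beq_self_eq_true, if_true]
          have := ih f ('*' :: rcur) acc t (by simpa using Nat.lt_of_succ_lt_succ hf)
          simp only [List.count_cons, List.any_cons, beq_self_eq_true, if_true,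
            bne_self_eq_false, Bool.false_or] at this
          rw [← this]
          norm_cast
        · have hxs : (x == '*') = false := by simpa using hs
          rw [hxs]
          simp only [Bool.false_eq_true, if_false]
          have := ih f (x :: rcur) acc t (by simpa using Nat.lt_of_succ_lt_succ hf)
          have hbne : (x != '*') = true := by simp [bne, hxs]
          simp only [List.count_cons, List.any_cons, hxs, hbne, Bool.true_or] at this
          simpa using this

-- the scan equals the summed weights of the single-char split
lemma pvScan_eq (s : String) (c : Char) :
    pvScan s c = pvSumW (PySem.Chars.splitOn s.toList [c]) := by
  unfold pvScan
  have := pvScan_go c s.toList (s.toList.length + 1) [] [] 0 (by omega)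
  simp only [List.count_nil, Nat.cast_zero, List.any_nil] at this
  rw [this]
  simp [PySem.Chars.splitOn, pvSumW]

-- A's split-and-fold over one pattern equals B's scan
lemma pvSide_eq (s : String) (sep : String) (c : Char) (hsep : sep.toList = [c])
    (acc : Int) :
    ((PySem.Str.split? s sep).getD []).foldl (fun acc part =>
      if part == "**" then acc + 0
      else if part == "*" then acc + 1
      else acc + 2) acc = acc + pvScan s c := by
  have hsplit : PySem.Str.split? s sep
      = some ((PySem.Chars.splitOn s.toList [c]).map String.ofList) := by
    simp [PySem.Str.split?, PySem.Chars.split?, hsep]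
  rw [hsplit]
  simp only [Option.getD_some]
  rw [pvFoldA_eq, pvScan_eq s c]

-- ===== VERDICT (by name: the statement is the Claim_ definition above) =====
theorem specificity_spec : Claim_equal_specificity := by
  intro ap rp _
  unfold Spec_specificity specificity specificity_alt
  have hdot : ("." : String).toList = ['.'] := rfl
  have hsl : ("/" : String).toList = ['/'] := rfl
  simp only [pvSide_eq ap "." '.' hdot, pvSide_eq _ "/" '/' hsl]
  split <;> ring
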